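-- pv_equiv track=rewrite | github.com/AdrienBenamira/my_SAT_solver | generate_dimacs_gift.py | diffusion
-- ===== SOURCE A (Python) =====
-- def diffusion(p):
--     b = [0, 0, 0, 0]
--     b[0] = ((p[0] >> 0) & 0x8) ^ ((p[1] >> 1) & 0x4) ^ ((p[2] >> 2) & 0x2) ^ ((p[3] >> 3) & 0x1);
--     b[1] = ((p[0] << 1) & 0x8) ^ ((p[1] >> 0) & 0x4) ^ ((p[2] >> 1) & 0x2) ^ ((p[3] >> 2) & 0x1);
--     b[2] = ((p[0] << 2) & 0x8) ^ ((p[1] << 1) & 0x4) ^ ((p[2] >> 0) & 0x2) ^ ((p[3] >> 1) & 0x1);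
--     b[3] = ((p[0] << 3) & 0x8) ^ ((p[1] << 2) & 0x4) ^ ((p[2] << 1) & 0x2) ^ ((p[3] >> 0) & 0x1);
--     for i in range(len(p)):
--         p[i] = b[i]
--     return p
-- ===== SOURCE B (Python) =====
-- # GIFT diffusion via a precomputed bit-spread table: each input nibble is
-- # spread so bit k lands at position 4k, packed into one 16-bit word, then
-- # the four output nibbles are sliced back out.
-- SPREAD = (0x0000, 0x0001, 0x0010, 0x0011, 0x0100, 0x0101, 0x0110, 0x0111,
--           0x1000, 0x1001, 0x1010, 0x1011, 0x1100, 0x1101, 0x1110, 0x1111)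
--
-- def diffusion(p):
--     w = sum(SPREAD[p[j] & 15] << (3 - j) for j in range(4))
--     b = [(w >> s) & 15 for s in (12, 8, 4, 0)]
--     for i in range(len(p)):
--         p[i] = b[i]
--     return p
-- ===== Notes on version B (the rewrite author's own statement) =====
-- stated objective: alternative
-- what changed: B replaces A's four hardcoded mask/shift/xor lines by a table-driven algorithm: a precomputed 16-entry SPREAD table spreads each input nibble's bits to every 4th position, the spread nibbles are summed into one packed 16-bit word, and the four output nibbles are sliced back out of it.
import Mathlib
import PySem

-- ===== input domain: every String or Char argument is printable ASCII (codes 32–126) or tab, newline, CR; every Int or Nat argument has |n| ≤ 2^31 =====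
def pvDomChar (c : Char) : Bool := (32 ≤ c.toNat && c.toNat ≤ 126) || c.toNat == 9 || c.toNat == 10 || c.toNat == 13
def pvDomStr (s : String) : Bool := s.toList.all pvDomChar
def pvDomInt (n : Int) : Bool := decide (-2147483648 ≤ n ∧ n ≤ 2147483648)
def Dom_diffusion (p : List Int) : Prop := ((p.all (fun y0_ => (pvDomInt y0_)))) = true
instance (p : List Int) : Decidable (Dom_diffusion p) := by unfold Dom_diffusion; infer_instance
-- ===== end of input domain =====

-- B replaces A's four hardcoded mask/shift/xor lines by a table-driven algorithm: a 16-entry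
-- SPREAD table spreads each input nibble's bits to every 4th position, the spread nibbles are
-- summed into one packed 16-bit word, and the output nibbles are sliced back out; alternative
-- decomposition, same cost. Both A and B mutate p in place identically (p[i] = b[i] for all i);
-- the theorems below are about the returned value.

-- ===== PORT A =====
-- Indexing uses pyGetD with default 0: Pre_diffusion guarantees every index is in range
-- (Python raises IndexError exactly when len(p) ≠ 4, excluded by Pre_diffusion).
def diffusion (p : List Int) : List Int :=
  let b0 := PySem.Int.bxor (PySem.Int.bxor (PySem.Int.bxor
      (PySem.Int.band ((PySem.List.pyGetD p 0 0) >>> 0) 0x8)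
      (PySem.Int.band ((PySem.List.pyGetD p 1 0) >>> 1) 0x4))
      (PySem.Int.band ((PySem.List.pyGetD p 2 0) >>> 2) 0x2))
      (PySem.Int.band ((PySem.List.pyGetD p 3 0) >>> 3) 0x1)
  let b1 := PySem.Int.bxor (PySem.Int.bxor (PySem.Int.bxor
      (PySem.Int.band ((PySem.List.pyGetD p 0 0) <<< 1) 0x8)
      (PySem.Int.band ((PySem.List.pyGetD p 1 0) >>> 0) 0x4))
      (PySem.Int.band ((PySem.List.pyGetD p 2 0) >>> 1) 0x2))
      (PySem.Int.band ((PySem.List.pyGetD p 3 0) >>> 2) 0x1)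
  let b2 := PySem.Int.bxor (PySem.Int.bxor (PySem.Int.bxor
      (PySem.Int.band ((PySem.List.pyGetD p 0 0) <<< 2) 0x8)
      (PySem.Int.band ((PySem.List.pyGetD p 1 0) <<< 1) 0x4))
      (PySem.Int.band ((PySem.List.pyGetD p 2 0) >>> 0) 0x2))
      (PySem.Int.band ((PySem.List.pyGetD p 3 0) >>> 1) 0x1)
  let b3 := PySem.Int.bxor (PySem.Int.bxor (PySem.Int.bxor
      (PySem.Int.band ((PySem.List.pyGetD p 0 0) <<< 3) 0x8)
      (PySem.Int.band ((PySem.List.pyGetD p 1 0) <<< 2) 0x4))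
      (PySem.Int.band ((PySem.List.pyGetD p 2 0) <<< 1) 0x2))
      (PySem.Int.band ((PySem.List.pyGetD p 3 0) >>> 0) 0x1)
  let b := [b0, b1, b2, b3]
  (PySem.List.pyRange 0 (p.length : Int) 1).foldl
    (fun q i => q.set i.toNat (PySem.List.pyGetD b i 0)) p

-- ===== PORT B =====
-- The module-level SPREAD table of Source B, verbatim.
def SPREAD_tbl : List Int :=
  [0x0000, 0x0001, 0x0010, 0x0011, 0x0100, 0x0101, 0x0110, 0x0111,
   0x1000, 0x1001, 0x1010, 0x1011, 0x1100, 0x1101, 0x1110, 0x1111]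

-- sum(...) over range(4) is the foldl; shift amounts (3-j) and the slice offsets are in 0..15,
-- so .toNat is exact there.
def diffusion_alt (p : List Int) : List Int :=
  let w := (PySem.List.pyRange 0 4 1).foldl
    (fun acc j =>
      acc + ((PySem.List.pyGetD SPREAD_tbl (PySem.Int.band (PySem.List.pyGetD p j 0) 15) 0)
              <<< (3 - j).toNat)) 0
  let b := ([12, 8, 4, 0] : List Int).map (fun s => PySem.Int.band (w >>> s.toNat) 15)
  (PySem.List.pyRange 0 (p.length : Int) 1).foldl
    (fun q i => q.set i.toNat (PySem.List.pyGetD b i 0)) p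

-- ===== PRECONDITION & SPEC =====
-- A reads p[0..3] and writes b[i] for every i < len(p): it raises IndexError unless len(p) = 4.
def Pre_diffusion (p : List Int) : Prop := p.length = 4
instance (p : List Int) : Decidable (Pre_diffusion p) := by unfold Pre_diffusion; infer_instance
def pvWitness_diffusion : List Int := [1, 2, 3, 4]

def Spec_diffusion (p : List Int) (out : List Int) : Prop := out = diffusion_alt p
instance (p : List Int) (out : List Int) : Decidable (Spec_diffusion p out) := by unfold Spec_diffusion; infer_instance

-- ===== CLAIM (what is proved, stated in full; the proofs are below) =====
def Claim_equal_diffusion : Prop := ∀ (p : List Int), Dom_diffusion p → Pre_diffusion p → Spec_diffusion p (diffusion p)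

-- ===== LEMMAS AND PROOFS =====

-- single-bit mask extraction as arithmetic: x & 2^k = x / 2^k % 2 * 2^k
lemma band_pow2 (x : Int) (k : Nat) (hk : k = 1 ∨ k = 2 ∨ k = 3) :
    PySem.Int.band x (2^k) = x / 2^k % 2 * 2^k := by
  unfold PySem.Int.band
  by_cases h : 0 ≤ x
  · have hx : x = (x.toNat : Int) := (Int.toNat_of_nonneg h).symm
    set n := x.toNat with hn
    have hb2 : (0:Int) ≤ 2^k := by positivity
    simp only [if_pos h, if_pos hb2]
    have h2 : ((2:Int)^k).toNat = 2^k := by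
      rcases hk with rfl | rfl | rfl <;> rfl
    rw [h2]
    have hand : n &&& 2^k = (n.testBit k).toNat * 2^k := Nat.and_two_pow n k
    have htb : n.testBit k = decide (n / 2^k % 2 = 1) := Nat.testBit_eq_decide_div_mod_eq
    cases hb : n.testBit k <;> rw [hb] at hand htb <;> simp at hand htb <;>
      rw [hand, hx] <;> push_cast <;>
      rcases hk with rfl | rfl | rfl <;> omega
  · set m := (-x-1).toNat with hmdef
    have hx : x = -(m : Int) - 1 := by omega
    have hb2 : (0:Int) ≤ 2^k := by positivity
    simp only [if_neg h, if_pos hb2]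
    have h2 : ((2:Int)^k).toNat = 2^k := by
      rcases hk with rfl | rfl | rfl <;> rfl
    rw [h2]
    have hand : 2^k &&& m = (m.testBit k).toNat * 2^k := by
      rw [Nat.and_comm]; exact Nat.and_two_pow m k
    have htb : m.testBit k = decide (m / 2^k % 2 = 1) := Nat.testBit_eq_decide_div_mod_eq
    cases hb : m.testBit k <;> rw [hb] at hand htb <;> simp at hand htb <;>
      rw [hand, hx] <;>
      rcases hk with rfl | rfl | rfl <;> push_cast <;> omega

lemma band8 (x : Int) : PySem.Int.band x 8 = x / 8 % 2 * 8 := by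
  have h := band_pow2 x 3 (by norm_num); norm_num at h; exact h

lemma band4 (x : Int) : PySem.Int.band x 4 = x / 4 % 2 * 4 := by
  have h := band_pow2 x 2 (by norm_num); norm_num at h; exact h

lemma band2 (x : Int) : PySem.Int.band x 2 = x / 2 % 2 * 2 := by
  have h := band_pow2 x 1 (by norm_num); norm_num at h; exact h

lemma band1 (x : Int) : PySem.Int.band x 1 = x % 2 := by
  rw [PySem.Int.band_one, PySem.Int.mod_eq_emod_of_pos (by norm_num)]

lemma band8_cases (x : Int) : PySem.Int.band x 8 = 0 ∨ PySem.Int.band x 8 = 8 := by rw [band8]; omega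
lemma band4_cases (x : Int) : PySem.Int.band x 4 = 0 ∨ PySem.Int.band x 4 = 4 := by rw [band4]; omega
lemma band2_cases (x : Int) : PySem.Int.band x 2 = 0 ∨ PySem.Int.band x 2 = 2 := by rw [band2]; omega
lemma band1_cases (x : Int) : PySem.Int.band x 1 = 0 ∨ PySem.Int.band x 1 = 1 := by rw [band1]; omega

-- low-nibble mask as arithmetic: x & 15 = x % 16 (Python semantics on negatives too)
lemma band15 (x : Int) : PySem.Int.band x 15 = x % 16 := by
  unfold PySem.Int.band
  by_cases h : 0 ≤ x
  · have hx : x = (x.toNat : Int) := (Int.toNat_of_nonneg h).symm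
    simp only [if_pos h, if_pos (by norm_num : (0:Int) ≤ 15)]
    have : x.toNat &&& (15:Int).toNat = x.toNat % 16 := by
      have := Nat.and_two_pow_sub_one_eq_mod x.toNat 4
      norm_num at this ⊢; exact this
    rw [this, hx]; push_cast; omega
  · set m := (-x-1).toNat with hmdef
    have hx : x = -(m : Int) - 1 := by omega
    simp only [if_neg h, if_pos (by norm_num : (0:Int) ≤ 15)]
    have : (15:Int).toNat &&& m = m % 16 := by
      rw [Nat.and_comm]
      have := Nat.and_two_pow_sub_one_eq_mod m 4
      norm_num at this ⊢; exact this
    rw [this, hx]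
    have hm16 := Nat.mod_lt m (show 0 < 16 by norm_num)
    push_cast; omega

-- the SPREAD table entry at index i ∈ [0,16) spreads i's four bits to positions 0,4,8,12
lemma spread_val (i : Int) (h0 : 0 ≤ i) (h1 : i < 16) :
    PySem.List.pyGetD SPREAD_tbl i 0
      = i % 2 + i / 2 % 2 * 16 + i / 4 % 2 * 256 + i / 8 % 2 * 4096 := by
  interval_cases i <;> decide

-- Python shifts as arithmetic (Int-literal amounts on A's side, Nat amounts on B's side)
lemma shiftR_int (x : Int) (k : Nat) : x >>> ((k:Nat) : Int) = x / 2^k := by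
  rw [Int.shiftRight_natCast_right, Int.shiftRight_eq_div_pow]; push_cast; ring_nf
lemma shiftL_int (x : Int) (k : Nat) : x <<< ((k:Nat) : Int) = x * 2^k := by
  rw [Int.shiftLeft_natCast_right, Int.shiftLeft_eq]
lemma sR0 (x : Int) : x >>> (0:Int) = x := by have h := shiftR_int x 0; norm_num at h; exact h
lemma sR1 (x : Int) : x >>> (1:Int) = x / 2 := by have h := shiftR_int x 1; norm_num at h; exact h
lemma sR2 (x : Int) : x >>> (2:Int) = x / 4 := by have h := shiftR_int x 2; norm_num at h; exact h
lemma sR3 (x : Int) : x >>> (3:Int) = x / 8 := by have h := shiftR_int x 3; norm_num at h; exact h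
lemma sR4 (x : Int) : x >>> (4:Int) = x / 16 := by have h := shiftR_int x 4; norm_num at h; exact h
lemma sR8 (x : Int) : x >>> (8:Int) = x / 256 := by have h := shiftR_int x 8; norm_num at h; exact h
lemma sR12 (x : Int) : x >>> (12:Int) = x / 4096 := by have h := shiftR_int x 12; norm_num at h; exact h
lemma nL1 (x : Int) : x <<< (1:Nat) = x * 2 := by rw [Int.shiftLeft_eq]; norm_num
lemma nL2 (x : Int) : x <<< (2:Nat) = x * 4 := by rw [Int.shiftLeft_eq]; norm_num
lemma nL3 (x : Int) : x <<< (3:Nat) = x * 8 := by rw [Int.shiftLeft_eq]; norm_num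
lemma sL1 (x : Int) : x <<< (1:Int) = x * 2 := by have h := shiftL_int x 1; norm_num at h; exact h
lemma sL2 (x : Int) : x <<< (2:Int) = x * 4 := by have h := shiftL_int x 2; norm_num at h; exact h
lemma sL3 (x : Int) : x <<< (3:Int) = x * 8 := by have h := shiftL_int x 3; norm_num at h; exact h

-- SPREAD lookup of a low nibble, as arithmetic on the four source bits
lemma spread_band (x : Int) :
    PySem.List.pyGetD SPREAD_tbl (PySem.Int.band x 15) 0
      = x % 2 + x / 2 % 2 * 16 + x / 4 % 2 * 256 + x / 8 % 2 * 4096 := by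
  rw [band15, spread_val (x % 16) (by omega) (by omega)]
  omega

-- a bit is a bit
lemma bb (t : Int) : 0 ≤ t % 2 ∧ t % 2 ≤ 1 := by omega

-- nibble extraction from the packed word, over 16 abstract single bits
lemma pack_div (v3 v2 v1 v0 u3 u2 u1 u0 s3 s2 s1 s0 r3 r2 r1 r0 : Int)
    (hv3 : 0 ≤ v3 ∧ v3 ≤ 1)
    (hv2 : 0 ≤ v2 ∧ v2 ≤ 1)
    (hv1 : 0 ≤ v1 ∧ v1 ≤ 1)
    (hv0 : 0 ≤ v0 ∧ v0 ≤ 1)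
    (hu3 : 0 ≤ u3 ∧ u3 ≤ 1)
    (hu2 : 0 ≤ u2 ∧ u2 ≤ 1)
    (hu1 : 0 ≤ u1 ∧ u1 ≤ 1)
    (hu0 : 0 ≤ u0 ∧ u0 ≤ 1)
    (hs3 : 0 ≤ s3 ∧ s3 ≤ 1)
    (hs2 : 0 ≤ s2 ∧ s2 ≤ 1)
    (hs1 : 0 ≤ s1 ∧ s1 ≤ 1)
    (hs0 : 0 ≤ s0 ∧ s0 ≤ 1)
    (hr3 : 0 ≤ r3 ∧ r3 ≤ 1)
    (hr2 : 0 ≤ r2 ∧ r2 ≤ 1)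
    (hr1 : 0 ≤ r1 ∧ r1 ≤ 1)
    (hr0 : 0 ≤ r0 ∧ r0 ≤ 1) :
    ((v0 + v1*16 + v2*256 + v3*4096)*8 + (u0 + u1*16 + u2*256 + u3*4096)*4
      + (s0 + s1*16 + s2*256 + s3*4096)*2 + (r0 + r1*16 + r2*256 + r3*4096)) / 4096 % 16 = v3*8 + u3*4 + s3*2 + r3
    ∧ ((v0 + v1*16 + v2*256 + v3*4096)*8 + (u0 + u1*16 + u2*256 + u3*4096)*4
      + (s0 + s1*16 + s2*256 + s3*4096)*2 + (r0 + r1*16 + r2*256 + r3*4096)) / 256 % 16 = v2*8 + u2*4 + s2*2 + r2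
    ∧ ((v0 + v1*16 + v2*256 + v3*4096)*8 + (u0 + u1*16 + u2*256 + u3*4096)*4
      + (s0 + s1*16 + s2*256 + s3*4096)*2 + (r0 + r1*16 + r2*256 + r3*4096)) / 16 % 16 = v1*8 + u1*4 + s1*2 + r1
    ∧ ((v0 + v1*16 + v2*256 + v3*4096)*8 + (u0 + u1*16 + u2*256 + u3*4096)*4
      + (s0 + s1*16 + s2*256 + s3*4096)*2 + (r0 + r1*16 + r2*256 + r3*4096)) % 16 = v0*8 + u0*4 + s0*2 + r0 := by
  refine ⟨by omega, by omega, by omega, by omega⟩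

-- the four nibble identities between A's per-bit arithmetic and B's packed word
lemma nib3 (a b c d : Int) :
    a / 8 % 2 * 8 + b / 2 / 4 % 2 * 4 + c / 4 / 2 % 2 * 2 + d / 8 % 2 =
    ((a % 2 + a / 2 % 2 * 16 + a / 4 % 2 * 256 + a / 8 % 2 * 4096) * 8 +
     (b % 2 + b / 2 % 2 * 16 + b / 4 % 2 * 256 + b / 8 % 2 * 4096) * 4 +
     (c % 2 + c / 2 % 2 * 16 + c / 4 % 2 * 256 + c / 8 % 2 * 4096) * 2 +
     (d % 2 + d / 2 % 2 * 16 + d / 4 % 2 * 256 + d / 8 % 2 * 4096)) / 4096 % 16 := by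
  have hb : b / 2 / 4 = b / 8 := by omega
  have hc : c / 4 / 2 = c / 8 := by omega
  rw [hb, hc]
  exact (pack_div (a/8%2) (a/4%2) (a/2%2) (a%2) (b/8%2) (b/4%2) (b/2%2) (b%2) (c/8%2) (c/4%2) (c/2%2) (c%2) (d/8%2) (d/4%2) (d/2%2) (d%2) (bb _) (bb _) (bb _) (bb _) (bb _) (bb _) (bb _) (bb _) (bb _) (bb _) (bb _) (bb _) (bb _) (bb _) (bb _) (bb _)).1.symm
lemma nib2 (a b c d : Int) :
    a * 2 / 8 % 2 * 8 + b / 4 % 2 * 4 + c / 2 / 2 % 2 * 2 + d / 4 % 2 =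
    ((a % 2 + a / 2 % 2 * 16 + a / 4 % 2 * 256 + a / 8 % 2 * 4096) * 8 +
     (b % 2 + b / 2 % 2 * 16 + b / 4 % 2 * 256 + b / 8 % 2 * 4096) * 4 +
     (c % 2 + c / 2 % 2 * 16 + c / 4 % 2 * 256 + c / 8 % 2 * 4096) * 2 +
     (d % 2 + d / 2 % 2 * 16 + d / 4 % 2 * 256 + d / 8 % 2 * 4096)) / 256 % 16 := by
  have ha : a * 2 / 8 = a / 4 := by omega
  have hc : c / 2 / 2 = c / 4 := by omega
  rw [ha, hc]
  exact (pack_div (a/8%2) (a/4%2) (a/2%2) (a%2) (b/8%2) (b/4%2) (b/2%2) (b%2) (c/8%2) (c/4%2) (c/2%2) (c%2) (d/8%2) (d/4%2) (d/2%2) (d%2) (bb _) (bb _) (bb _) (bb _) (bb _) (bb _) (bb _) (bb _) (bb _) (bb _) (bb _) (bb _) (bb _) (bb _) (bb _) (bb _)).2.1.symm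
lemma nib1 (a b c d : Int) :
    a * 4 / 8 % 2 * 8 + b * 2 / 4 % 2 * 4 + c / 2 % 2 * 2 + d / 2 % 2 =
    ((a % 2 + a / 2 % 2 * 16 + a / 4 % 2 * 256 + a / 8 % 2 * 4096) * 8 +
     (b % 2 + b / 2 % 2 * 16 + b / 4 % 2 * 256 + b / 8 % 2 * 4096) * 4 +
     (c % 2 + c / 2 % 2 * 16 + c / 4 % 2 * 256 + c / 8 % 2 * 4096) * 2 +
     (d % 2 + d / 2 % 2 * 16 + d / 4 % 2 * 256 + d / 8 % 2 * 4096)) / 16 % 16 := by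
  have ha : a * 4 / 8 = a / 2 := by omega
  have hb : b * 2 / 4 = b / 2 := by omega
  rw [ha, hb]
  exact (pack_div (a/8%2) (a/4%2) (a/2%2) (a%2) (b/8%2) (b/4%2) (b/2%2) (b%2) (c/8%2) (c/4%2) (c/2%2) (c%2) (d/8%2) (d/4%2) (d/2%2) (d%2) (bb _) (bb _) (bb _) (bb _) (bb _) (bb _) (bb _) (bb _) (bb _) (bb _) (bb _) (bb _) (bb _) (bb _) (bb _) (bb _)).2.2.1.symm
lemma nib0 (a b c d : Int) :
    a * 8 / 8 % 2 * 8 + b * 4 / 4 % 2 * 4 + c * 2 / 2 % 2 * 2 + d % 2 =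
    ((a % 2 + a / 2 % 2 * 16 + a / 4 % 2 * 256 + a / 8 % 2 * 4096) * 8 +
     (b % 2 + b / 2 % 2 * 16 + b / 4 % 2 * 256 + b / 8 % 2 * 4096) * 4 +
     (c % 2 + c / 2 % 2 * 16 + c / 4 % 2 * 256 + c / 8 % 2 * 4096) * 2 +
     (d % 2 + d / 2 % 2 * 16 + d / 4 % 2 * 256 + d / 8 % 2 * 4096)) % 16 := by
  have ha : a * 8 / 8 = a := by omega
  have hb : b * 4 / 4 = b := by omega
  have hc : c * 2 / 2 = c := by omega
  rw [ha, hb, hc]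
  exact (pack_div (a/8%2) (a/4%2) (a/2%2) (a%2) (b/8%2) (b/4%2) (b/2%2) (b%2) (c/8%2) (c/4%2) (c/2%2) (c%2) (d/8%2) (d/4%2) (d/2%2) (d%2) (bb _) (bb _) (bb _) (bb _) (bb _) (bb _) (bb _) (bb _) (bb _) (bb _) (bb _) (bb _) (bb _) (bb _) (bb _) (bb _)).2.2.2.symm

-- xor of values carrying disjoint single bits is their sum
lemma bxor_disjoint (t3 t2 t1 t0 : Int)
    (h3 : t3 = 0 ∨ t3 = 8) (h2 : t2 = 0 ∨ t2 = 4)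
    (h1 : t1 = 0 ∨ t1 = 2) (h0 : t0 = 0 ∨ t0 = 1) :
    PySem.Int.bxor (PySem.Int.bxor (PySem.Int.bxor t3 t2) t1) t0 = t3 + t2 + t1 + t0 := by
  rcases h3 with rfl | rfl <;> rcases h2 with rfl | rfl <;>
    rcases h1 with rfl | rfl <;> rcases h0 with rfl | rfl <;> decide

-- ===== VERDICT (by name: the statement is the Claim_ definition above) =====
theorem diffusion_spec : Claim_equal_diffusion := by
  intro p _ hpre
  unfold Spec_diffusion
  match p, hpre with
  | [a, b, c, d], _ =>
    simp only [diffusion, diffusion_alt]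
    norm_num [PySem.List.pyRange, List.range_succ, List.foldl, List.map, Int.toNat]
    simp only [spread_band]
    norm_num [PySem.List.pyGetD, PySem.List.pyGet?, PySem.List.pyIdx?, List.set,
      Int.toNat, Option.bind, Option.getD]
    refine ⟨?_, ?_, ?_, ?_⟩ <;>
      rw [bxor_disjoint _ _ _ _ (band8_cases _) (band4_cases _) (band2_cases _) (band1_cases _)] <;>
      simp only [band8, band4, band2, band1, band15, sR0, sR1, sR2, sR3, sR4, sR8, sR12,
        sL1, sL2, sL3, nL1, nL2, nL3]
    · exact nib3 a b c d
    · exact nib2 a b c d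
    · exact nib1 a b c d
    · exact nib0 a b c d
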